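-- pv_equiv track=rewrite | github.com/hamidahoderinwale/cursor-telemetry | components/dashboard/src/clio-integration/kura_bridge.py | _create_hierarchy_mapping
-- ===== SOURCE A (Python) =====
-- from typing import List, Dict, Any, Optional
--
-- def _create_hierarchy_mapping(goals: List[Dict]) -> Dict[str, List[str]]:
--     """Create mapping of goal levels to descriptions"""
--     hierarchy = {}
--     for goal in goals:
--         level = goal.get('level', 'unknown')
--         description = goal.get('description', '')
--
--         if level not in hierarchy:
--             hierarchy[level] = []
--         if description and description not in hierarchy[level]:
--             hierarchy[level].append(description)
--
--     return hierarchy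
-- ===== SOURCE B (Python) =====
-- def _create_hierarchy_mapping(goals):
--     """Create mapping of goal levels to descriptions (two-pass: group, then reshape)"""
--     groups = {}
--     for goal in goals:
--         level = goal.get('level', 'unknown')
--         groups.setdefault(level, []).append(goal.get('description', ''))
--     return {level: list(dict.fromkeys(d for d in descs if d))
--             for level, descs in groups.items()}
-- ===== Notes on version B (the rewrite author's own statement) =====
-- stated objective: alternative
-- what changed: A dedups and filters inside the single loop via a membership test on the growing per-level list; B first groups all raw descriptions by level in one pass, then reshapes each group with a filter + ordered dedup (dict.fromkeys) in a second pass.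
import Mathlib
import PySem

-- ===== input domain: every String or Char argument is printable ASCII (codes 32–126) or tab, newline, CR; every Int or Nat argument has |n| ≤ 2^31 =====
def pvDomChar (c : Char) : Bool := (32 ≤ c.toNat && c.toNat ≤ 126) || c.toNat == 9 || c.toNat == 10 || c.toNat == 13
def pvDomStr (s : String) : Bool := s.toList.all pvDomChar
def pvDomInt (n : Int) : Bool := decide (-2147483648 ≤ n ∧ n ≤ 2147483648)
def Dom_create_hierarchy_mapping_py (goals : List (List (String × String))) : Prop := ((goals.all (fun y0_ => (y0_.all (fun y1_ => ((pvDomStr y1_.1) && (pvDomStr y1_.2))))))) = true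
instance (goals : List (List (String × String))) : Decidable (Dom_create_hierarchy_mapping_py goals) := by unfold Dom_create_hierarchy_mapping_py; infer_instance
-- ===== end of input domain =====

-- B differs from A by decomposition: A filters/dedups inside its single loop; B groups raw
-- descriptions by level in one pass and reshapes each group (filter + ordered dedup) in a second.

-- ===== PORT A =====
-- goal.get('level', 'unknown') / goal.get('description', '')
def pvLvl (goal : List (String × String)) : String :=
  (PySem.Dict.mk goal).getD "level" "unknown"

def pvDesc (goal : List (String × String)) : String :=
  (PySem.Dict.mk goal).getD "description" ""

-- one iteration of A's loop body over the state `hierarchy`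
def pvStepA (h : PySem.Dict String (List String)) (goal : List (String × String)) :
    PySem.Dict String (List String) :=
  let level := pvLvl goal
  let description := pvDesc goal
  let h1 := if h.contains level then h else h.insert level []
  if description ≠ "" ∧ description ∉ h1.getD level [] then
    h1.modify level [] (fun xs => xs ++ [description])   -- hierarchy[level].append(description)
  else h1

def create_hierarchy_mapping_py (goals : List (List (String × String))) :
    List (String × List String) :=
  (goals.foldl pvStepA PySem.Dict.empty).items

-- ===== PORT B =====
-- one iteration of B's grouping pass: groups.setdefault(level, []).append(goal.get('description',''))
def pvStepB (g : PySem.Dict String (List String)) (goal : List (String × String)) :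
    PySem.Dict String (List String) :=
  g.modify (pvLvl goal) [] (fun xs => xs ++ [pvDesc goal])

def create_hierarchy_mapping_py_alt (goals : List (List (String × String))) :
    List (String × List String) :=
  let groups := goals.foldl pvStepB PySem.Dict.empty
  -- {level: list(dict.fromkeys(d for d in descs if d)) for level, descs in groups.items()}
  groups.items.map (fun p => (p.1, PySem.List.dedup (p.2.filter (fun d => d ≠ ""))))

-- ===== PRECONDITION & SPEC =====
def Spec_create_hierarchy_mapping_py (goals : List (List (String × String))) (out : List (String × List String)) : Prop := out = create_hierarchy_mapping_py_alt goals
instance (goals : List (List (String × String))) (out : List (String × List String)) : Decidable (Spec_create_hierarchy_mapping_py goals out) := by unfold Spec_create_hierarchy_mapping_py; infer_instance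

-- ===== CLAIM (what is proved, stated in full; the proofs are below) =====
def Claim_equal_create_hierarchy_mapping_py : Prop := ∀ (goals : List (List (String × String))), Dom_create_hierarchy_mapping_py goals → Spec_create_hierarchy_mapping_py goals (create_hierarchy_mapping_py goals)

-- ===== LEMMAS AND PROOFS =====

-- reshape of one (level, raw descriptions) pair, and of a whole B-state
def pvShape (p : String × List String) : String × List String :=
  (p.1, PySem.List.dedup (p.2.filter (fun d => d ≠ "")))

def pvF (g : PySem.Dict String (List String)) : PySem.Dict String (List String) :=
  PySem.Dict.mk (g.items.map pvShape)

theorem pvF_keys (g : PySem.Dict String (List String)) : (pvF g).keys = g.keys := by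
  simp [pvF, PySem.Dict.keys, pvShape, List.map_map, Function.comp]

theorem pvF_contains (g : PySem.Dict String (List String)) (k : String) :
    (pvF g).contains k = g.contains k := by
  simp [PySem.Dict.contains_eq_decide_mem_keys, pvF_keys]

theorem pv_dedup_append (xs : List String) (d : String) :
    PySem.List.dedup (xs ++ [d]) =
      if d ∈ xs then PySem.List.dedup xs else PySem.List.dedup xs ++ [d] := by
  simp only [PySem.List.dedup, PySem.Set.ofList_eq_foldl, List.foldl_append, List.foldl_cons,
    List.foldl_nil]
  by_cases h : d ∈ xs
  · have hm : d ∈ List.foldl PySem.Set.add [] xs := by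
      rw [← PySem.Set.ofList_eq_foldl]; exact (PySem.Set.mem_ofList xs d).2 h
    simp [PySem.Set.add, PySem.Set.contains, h, hm]
  · have hm : d ∉ List.foldl PySem.Set.add [] xs := by
      rw [← PySem.Set.ofList_eq_foldl]
      exact fun hm => h ((PySem.Set.mem_ofList xs d).1 hm)
    simp [PySem.Set.add, PySem.Set.contains, h, hm]

theorem pv_mem_dedup_filter (v : List String) (d : String) :
    d ∈ PySem.List.dedup (v.filter (fun s => s ≠ "")) ↔ d ∈ v ∧ d ≠ "" := by
  rw [PySem.List.dedup, PySem.Set.mem_ofList, List.mem_filter]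
  simp

theorem pvF_getD (g : PySem.Dict String (List String)) (l : String) (hnd : g.keys.Nodup)
    (hc : g.contains l = true) :
    (pvF g).getD l [] = PySem.List.dedup ((g.getD l []).filter (fun s => s ≠ "")) := by
  have hk : l ∈ g.keys := (PySem.Dict.contains_iff_mem_keys g l).1 hc
  obtain ⟨p, hp, hpl⟩ : ∃ p ∈ g.items, p.1 = l := by
    simpa [PySem.Dict.keys] using hk
  have hv : g.getD l [] = p.2 := by
    refine PySem.Dict.getD_of_mem_items g ?_ hnd []
    rw [← hpl]; simpa using hp
  have hmem : (l, PySem.List.dedup (p.2.filter (fun s => s ≠ ""))) ∈ (pvF g).items := by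
    simp only [pvF]
    refine List.mem_map.2 ⟨p, hp, ?_⟩
    simp [pvShape, hpl]
  have hnd' : (pvF g).keys.Nodup := by rw [pvF_keys]; exact hnd
  rw [hv]
  exact PySem.Dict.getD_of_mem_items (pvF g) hmem hnd' []

theorem pv_step (g : PySem.Dict String (List String)) (goal : List (String × String))
    (hnd : g.keys.Nodup) : pvStepA (pvF g) goal = pvF (pvStepB g goal) := by
  simp only [pvStepA, pvStepB, PySem.Dict.modify, pvF_contains]
  by_cases hc : g.contains (pvLvl goal) = true
  · simp only [hc, if_true, pvF_getD g (pvLvl goal) hnd hc]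
    set l := pvLvl goal with hl
    set d := pvDesc goal with hdd
    set v := g.getD l [] with hv
    have hrhs : (pvF (g.insert l (v ++ [d]))).items
        = g.items.map (fun p => pvShape (if (p.1 == l) = true then (l, v ++ [d]) else p)) := by
      simp [pvF, PySem.Dict.items_insert_of_contains _ _ hc, List.map_map, Function.comp]
    have hpoint : ∀ p ∈ g.items, p.1 = l → p.2 = v := by
      intro p hp hpl
      have := PySem.Dict.getD_of_mem_items g (k := l) (v := p.2)
        (by rw [← hpl]; simpa using hp) hnd []
      rw [hv]; exact this.symm
    by_cases hcond : d ≠ "" ∧ d ∉ PySem.List.dedup (v.filter (fun s => s ≠ ""))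
    · -- append case: d nonempty and new for this level
      have hd : d ≠ "" := hcond.1
      have hdv : d ∉ v := fun h => hcond.2 ((pv_mem_dedup_filter v d).2 ⟨h, hd⟩)
      rw [if_pos hcond]
      apply PySem.Dict.ext
      rw [hrhs]
      have hcF : (pvF g).contains l = true := by rw [pvF_contains]; exact hc
      rw [PySem.Dict.items_insert_of_contains _ _ hcF]
      show ((g.items.map pvShape).map _) = _
      rw [List.map_map]
      refine List.map_congr_left ?_
      intro p hp
      by_cases hpl : p.1 = l
      · have hpv : p.2 = v := hpoint p hp hpl
        simp only [Function.comp, pvShape, hpl, hpv, beq_self_eq_true, if_true]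
        have : (v ++ [d]).filter (fun s => decide (s ≠ "")) =
            v.filter (fun s => decide (s ≠ "")) ++ [d] := by
          simp [List.filter_append, hd]
        rw [this, pv_dedup_append]
        rw [if_neg (fun hm => hdv (List.mem_filter.1 hm).1)]
      · simp [Function.comp, pvShape, hpl]
    · -- skip case: d empty or already present
      rw [if_neg hcond]
      apply PySem.Dict.ext
      rw [hrhs]
      show (g.items.map pvShape) = _
      refine List.map_congr_left ?_
      intro p hp
      by_cases hpl : p.1 = l
      · have hpv : p.2 = v := hpoint p hp hpl
        simp only [pvShape, hpl, hpv, beq_self_eq_true, if_true]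
        by_cases hd : d = ""
        · simp [List.filter_append, hd]
        · have hdv : d ∈ v := by
            rcases not_and_or.1 hcond with h | h
            · exact absurd hd (by simpa using h)
            · exact ((pv_mem_dedup_filter v d).1 (not_not.1 h)).1
          have : (v ++ [d]).filter (fun s => decide (s ≠ "")) =
              v.filter (fun s => decide (s ≠ "")) ++ [d] := by
            simp [List.filter_append, hd]
          rw [this, pv_dedup_append,
            if_pos (List.mem_filter.2 ⟨hdv, by simpa using hd⟩)]
      · simp [pvShape, hpl]
  · -- fresh level key
    have hc' : g.contains (pvLvl goal) = false := by
      exact Bool.not_eq_true _ ▸ (by simpa using hc)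
    simp only [hc', Bool.false_eq_true, if_false, PySem.Dict.getD_insert_self,
      List.not_mem_nil, not_false_eq_true, and_true, List.nil_append,
      PySem.Dict.insert_insert_self, PySem.Dict.getD_of_not_contains _ _ hc']
    by_cases hd : pvDesc goal = ""
    · rw [if_neg (by simp [hd])]
      apply PySem.Dict.ext
      rw [PySem.Dict.items_insert_of_not_contains _ _ (by rw [pvF_contains]; exact hc')]
      simp [pvF, PySem.Dict.items_insert_of_not_contains _ _ hc', pvShape, hd]
    · rw [if_pos hd]
      apply PySem.Dict.ext
      rw [PySem.Dict.items_insert_of_not_contains _ _ (by rw [pvF_contains]; exact hc')]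
      simp [pvF, PySem.Dict.items_insert_of_not_contains _ _ hc', pvShape, hd,
        PySem.Set.ofList_eq_foldl, PySem.Set.add, PySem.Set.contains]

theorem pv_fold (goals : List (List (String × String))) (g : PySem.Dict String (List String))
    (hnd : g.keys.Nodup) :
    goals.foldl pvStepA (pvF g) = pvF (goals.foldl pvStepB g) := by
  induction goals generalizing g with
  | nil => rfl
  | cons goal rest ih =>
    have h1 : pvStepA (pvF g) goal = pvF (pvStepB g goal) := pv_step g goal hnd
    have h2 : (pvStepB g goal).keys.Nodup := by
      have := PySem.Dict.nodup_keys_foldl_modify_key [goal] pvLvl []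
        (fun d x xs => xs ++ [pvDesc x]) g hnd
      simpa [pvStepB, PySem.Dict.modify] using this
    simp only [List.foldl_cons, h1, ih _ h2]

-- ===== VERDICT (by name: the statement is the Claim_ definition above) =====
theorem create_hierarchy_mapping_py_spec : Claim_equal_create_hierarchy_mapping_py := by
  intro goals _
  unfold Spec_create_hierarchy_mapping_py create_hierarchy_mapping_py create_hierarchy_mapping_py_alt
  have h : goals.foldl pvStepA PySem.Dict.empty = pvF (goals.foldl pvStepB PySem.Dict.empty) :=
    pv_fold goals PySem.Dict.empty (by simp [PySem.Dict.keys, PySem.Dict.empty])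
  rw [h]
  rfl
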